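-- pv_equiv track=rewrite | github.com/dy-sh/spoty | spoty/utils.py | get_missing_tags
-- ===== SOURCE A (Python) =====
-- tag_allies = [
--     ['YEAR', 'DATE'],
--     ['TRACK', 'TRACKNUMBER'],
--     ['DISK', 'DISKNUMBER']
-- ]
--
-- spoty_tags = \
--     [
--         'SPOTY_DUP_GROUP',
--         'SPOTY_DEF_DUP_TAGS',
--         'SPOTY_PROB_DUP_TAGS',
--         'SPOTY_DUP_LIST',
--         'SPOTY_DUP_ID',
--         'SPOTY_FOUND_BY',
--         'SPOTY_SOURCE',
--         'SPOTY_PLAYLIST_NAME',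
--         'SPOTY_PLAYLIST_ID',
--         'SPOTY_PLAYLIST_INDEX',
--         'SPOTY_FILE_NAME',
--         'SPOTY_TRACK_ID',
--         'SPOTY_TRACK_ADDED',
--         'SPOTY_LENGTH',
--     ]
--
-- def get_missing_tags(exist_tags: dict, new_tags: dict):
--     missing_tags = {}
--
--     for key, value in new_tags.items():
--         if key == 'LENGTH':
--             continue
--
--         if key in spoty_tags:
--             continue
--
--         if key in exist_tags:
--             continue
--
--         found = False
--         for aliases in tag_allies:
--             if key in aliases:
--                 for al in aliases:
--                     if al in exist_tags:
--                         found = True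
--         if found:
--             continue
--
--         missing_tags[key] = value
--
--     return missing_tags
-- ===== SOURCE B (Python) =====
-- tag_allies = [
--     ['YEAR', 'DATE'],
--     ['TRACK', 'TRACKNUMBER'],
--     ['DISK', 'DISKNUMBER']
-- ]
--
-- spoty_tags = \
--     [
--         'SPOTY_DUP_GROUP',
--         'SPOTY_DEF_DUP_TAGS',
--         'SPOTY_PROB_DUP_TAGS',
--         'SPOTY_DUP_LIST',
--         'SPOTY_DUP_ID',
--         'SPOTY_FOUND_BY',
--         'SPOTY_SOURCE',
--         'SPOTY_PLAYLIST_NAME',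
--         'SPOTY_PLAYLIST_ID',
--         'SPOTY_PLAYLIST_INDEX',
--         'SPOTY_FILE_NAME',
--         'SPOTY_TRACK_ID',
--         'SPOTY_TRACK_ADDED',
--         'SPOTY_LENGTH',
--     ]
--
-- def get_missing_tags(exist_tags: dict, new_tags: dict):
--     # Precompute the set of "present" keys: every existing key, plus every
--     # member of an alias group of which some member already exists.
--     present = set(exist_tags)
--     for group in tag_allies:
--         if any(m in exist_tags for m in group):
--             present.update(group)
--
--     missing_tags = {}
--     for key, value in new_tags.items():
--         if key == 'LENGTH' or key in spoty_tags or key in present: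
--             continue
--         missing_tags[key] = value
--     return missing_tags
-- ===== Notes on version B (the rewrite author's own statement) =====
-- stated objective: simpler
-- what changed: B precomputes once a 'present' key set (existing keys plus every member of any alias group that has an existing member) and replaces A's per-key nested scan over tag_allies and its found-flag loop with a single membership test in the one pass over new_tags.
import Mathlib
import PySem

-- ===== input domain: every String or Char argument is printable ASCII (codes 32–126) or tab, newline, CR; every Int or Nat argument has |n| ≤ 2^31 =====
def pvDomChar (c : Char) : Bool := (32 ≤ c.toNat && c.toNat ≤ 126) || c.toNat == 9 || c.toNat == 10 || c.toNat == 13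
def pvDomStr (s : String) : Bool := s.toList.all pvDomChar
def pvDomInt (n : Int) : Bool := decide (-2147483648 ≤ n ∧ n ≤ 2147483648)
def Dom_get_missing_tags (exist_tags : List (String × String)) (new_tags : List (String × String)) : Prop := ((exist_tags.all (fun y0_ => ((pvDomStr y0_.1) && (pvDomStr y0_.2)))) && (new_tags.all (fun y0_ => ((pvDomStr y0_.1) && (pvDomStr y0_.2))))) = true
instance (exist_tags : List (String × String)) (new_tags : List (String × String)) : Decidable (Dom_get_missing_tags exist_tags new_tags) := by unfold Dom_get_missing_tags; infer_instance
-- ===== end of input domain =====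

-- B replaces A's per-key nested scan over tag_allies with a one-time "present" key set
-- (existing keys plus whole alias groups that have an existing member); objective: simpler.

-- ===== PORT A =====
def tagAllies : List (List String) :=
  [["YEAR", "DATE"], ["TRACK", "TRACKNUMBER"], ["DISK", "DISKNUMBER"]]

def spotyTags : List String :=
  ["SPOTY_DUP_GROUP", "SPOTY_DEF_DUP_TAGS", "SPOTY_PROB_DUP_TAGS", "SPOTY_DUP_LIST",
   "SPOTY_DUP_ID", "SPOTY_FOUND_BY", "SPOTY_SOURCE", "SPOTY_PLAYLIST_NAME",
   "SPOTY_PLAYLIST_ID", "SPOTY_PLAYLIST_INDEX", "SPOTY_FILE_NAME", "SPOTY_TRACK_ID",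
   "SPOTY_TRACK_ADDED", "SPOTY_LENGTH"]

def get_missing_tags (exist_tags : List (String × String)) (new_tags : List (String × String)) : List (String × String) :=
  (new_tags.foldl (fun (missing : PySem.Dict String String) kv =>
      if kv.1 == "LENGTH" then missing
      else if spotyTags.contains kv.1 then missing
      else if (exist_tags.map Prod.fst).contains kv.1 then missing
      else
        let found := tagAllies.foldl (fun f aliases =>
          if aliases.contains kv.1 then
            aliases.foldl (fun f al =>
              if (exist_tags.map Prod.fst).contains al then true else f) f
          else f) false
        if found then missing
        else missing.insert kv.1 kv.2) PySem.Dict.empty).items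

-- ===== PORT B =====
def presentKeys (exist_tags : List (String × String)) : List String :=
  tagAllies.foldl (fun pres group =>
      if group.any (fun m => (exist_tags.map Prod.fst).contains m) then
        group.foldl PySem.Set.add pres
      else pres)
    (PySem.Set.ofList (exist_tags.map Prod.fst))

def get_missing_tags_alt (exist_tags : List (String × String)) (new_tags : List (String × String)) : List (String × String) :=
  let present := presentKeys exist_tags
  (new_tags.foldl (fun (missing : PySem.Dict String String) kv =>
      if kv.1 == "LENGTH" || spotyTags.contains kv.1 || present.contains kv.1 then missing
      else missing.insert kv.1 kv.2) PySem.Dict.empty).items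

-- ===== PRECONDITION & SPEC =====
def Spec_get_missing_tags (exist_tags : List (String × String)) (new_tags : List (String × String)) (out : List (String × String)) : Prop := out = get_missing_tags_alt exist_tags new_tags
instance (exist_tags : List (String × String)) (new_tags : List (String × String)) (out : List (String × String)) : Decidable (Spec_get_missing_tags exist_tags new_tags out) := by unfold Spec_get_missing_tags; infer_instance

-- ===== CLAIM (what is proved, stated in full; the proofs are below) =====
def Claim_equal_get_missing_tags : Prop := ∀ (exist_tags : List (String × String)) (new_tags : List (String × String)), Dom_get_missing_tags exist_tags new_tags → Spec_get_missing_tags exist_tags new_tags (get_missing_tags exist_tags new_tags)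

-- ===== LEMMAS AND PROOFS =====

theorem inner_found_fold (E : List String) (aliases : List String) (b : Bool) :
    aliases.foldl (fun f al => if E.contains al then true else f) b
      = (b || aliases.any (fun al => E.contains al)) := by
  induction aliases generalizing b with
  | nil => simp
  | cons a t ih =>
      simp only [List.foldl_cons, List.any_cons, ih]
      cases b <;> simp

theorem found_fold (E : List String) (key : String) (groups : List (List String)) (b : Bool) :
    groups.foldl (fun f aliases =>
        if aliases.contains key then
          aliases.foldl (fun f al => if E.contains al then true else f) f
        else f) b
      = (b || groups.any (fun g => g.contains key && g.any (fun al => E.contains al))) := by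
  induction groups generalizing b with
  | nil => simp
  | cons g t ih =>
      simp only [List.foldl_cons, List.any_cons]
      by_cases h : g.contains key = true
      · rw [if_pos h, inner_found_fold, ih, h]
        simp [Bool.or_assoc]
      · rw [if_neg h, ih]
        simp only [List.contains_eq_mem, decide_eq_true_eq] at h
        simp [h]

theorem mem_foldl_set_add (pres : List String) (group : List String) (key : String) :
    key ∈ group.foldl PySem.Set.add pres ↔ key ∈ pres ∨ key ∈ group := by
  induction group generalizing pres with
  | nil => simp
  | cons a t ih => simp [List.foldl, ih, PySem.Set.mem_add]; tauto

theorem mem_present_fold (E : List String) (key : String) (groups : List (List String)) (pres : List String) :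
    key ∈ groups.foldl (fun pres group =>
        if group.any (fun m => E.contains m) then group.foldl PySem.Set.add pres else pres) pres
      ↔ key ∈ pres ∨ ∃ g ∈ groups, (g.any (fun m => E.contains m)) = true ∧ key ∈ g := by
  induction groups generalizing pres with
  | nil => simp
  | cons g t ih =>
      simp only [List.foldl_cons, List.mem_cons]
      by_cases h : (g.any fun m => E.contains m) = true
      · rw [if_pos h, ih, mem_foldl_set_add]
        constructor
        · rintro (⟨hp | hk⟩ | ⟨g', hg', hx, hk⟩)
          · exact Or.inl hp
          · exact Or.inr ⟨g, Or.inl rfl, h, hk⟩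
          · exact Or.inr ⟨g', Or.inr hg', hx, hk⟩
        · rintro (hp | ⟨g', hg' | hg', hx, hk⟩)
          · exact Or.inl (Or.inl hp)
          · exact Or.inl (Or.inr (hg' ▸ hk))
          · exact Or.inr ⟨g', hg', hx, hk⟩
      · rw [if_neg h, ih]
        constructor
        · rintro (hp | ⟨g', hg', hx, hk⟩)
          · exact Or.inl hp
          · exact Or.inr ⟨g', Or.inr hg', hx, hk⟩
        · rintro (hp | ⟨g', hg' | hg', hx, hk⟩)
          · exact Or.inl hp
          · exact absurd (hg' ▸ hx) h
          · exact Or.inr ⟨g', hg', hx, hk⟩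

theorem presentKeys_contains (exist_tags : List (String × String)) (key : String) :
    (presentKeys exist_tags).contains key
      = ((exist_tags.map Prod.fst).contains key
         || tagAllies.foldl (fun f aliases =>
              if aliases.contains key then
                aliases.foldl (fun f al =>
                  if (exist_tags.map Prod.fst).contains al then true else f) f
              else f) false) := by
  have hL : key ∈ presentKeys exist_tags
      ↔ key ∈ exist_tags.map Prod.fst
        ∨ ∃ g ∈ tagAllies, (g.any (fun m => (exist_tags.map Prod.fst).contains m)) = true ∧ key ∈ g := by
    unfold presentKeys
    rw [mem_present_fold]
    simp [PySem.Set.mem_ofList]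
  rw [Bool.eq_iff_iff, found_fold]
  simp only [List.contains_eq_mem, decide_eq_true_eq, Bool.or_eq_true, Bool.false_or,
    List.any_eq_true, Bool.and_eq_true] at *
  rw [hL]
  tauto

theorem steps_agree (exist_tags : List (String × String)) :
    (fun (missing : PySem.Dict String String) (kv : String × String) =>
      if kv.1 == "LENGTH" then missing
      else if spotyTags.contains kv.1 then missing
      else if (exist_tags.map Prod.fst).contains kv.1 then missing
      else
        let found := tagAllies.foldl (fun f aliases =>
          if aliases.contains kv.1 then
            aliases.foldl (fun f al =>
              if (exist_tags.map Prod.fst).contains al then true else f) f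
          else f) false
        if found then missing
        else missing.insert kv.1 kv.2)
    = (fun (missing : PySem.Dict String String) kv =>
      if kv.1 == "LENGTH" || spotyTags.contains kv.1 || (presentKeys exist_tags).contains kv.1 then missing
      else missing.insert kv.1 kv.2) := by
  funext missing kv
  rw [presentKeys_contains exist_tags kv.1]
  by_cases h1 : kv.1 == "LENGTH" <;> by_cases h2 : spotyTags.contains kv.1 <;>
    by_cases h3 : (exist_tags.map Prod.fst).contains kv.1 <;>
    simp [h1] <;> split <;> simp_all

-- ===== VERDICT (by name: the statement is the Claim_ definition above) =====
theorem get_missing_tags_spec : Claim_equal_get_missing_tags := by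
  intro exist_tags new_tags _
  unfold Spec_get_missing_tags get_missing_tags get_missing_tags_alt
  rw [steps_agree exist_tags]
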